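-- pv_equiv track=rewrite | github.com/MRX-we/Checker | Checker.py | check_queen_left
-- ===== SOURCE A (Python) =====
-- def check_queen_left(board, pos, drag_piece, last_piece, size, up):
--     cur_x = pos[0]
--     cur_y = pos[1]
--     valid_moves = []
--     if cur_x - 1 >= 0:
--         if drag_piece[0][0] == 'white':
--             if up:
--                 if cur_y - 1 >= 0:
--                     if board[cur_y - 1][cur_x - 1] is None:
--                         if last_piece is None:
--                             return [cur_y - 1, cur_x - 1]
--                         else:
--                             return [cur_y - 1, cur_x - 1]
--                     elif board[cur_y - 1][cur_x - 1][0] == 'white':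
--                         return None
--                     elif board[cur_y - 1][cur_x - 1][0] == 'black':
--                         if last_piece is None:
--                             last_piece = board[cur_y - 1][cur_x - 1]
--                             return check_queen_left(board, (cur_x - 1, cur_y - 1), drag_piece, last_piece, size, up)
--                         else:
--                             return None
--                 else:
--                     return None
--             else:
--                 if cur_y + 1 < size:
--                     if board[cur_y + 1][cur_x - 1] is None:
--                         if last_piece is None:
--                             return [cur_y + 1, cur_x - 1]
--                         else:
--                             return [cur_y + 1, cur_x - 1]
--                     elif board[cur_y + 1][cur_x - 1][0] == 'white':
--                         return None
--                     elif board[cur_y + 1][cur_x - 1][0] == 'black':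
--                         if last_piece is None:
--                             last_piece = board[cur_y + 1][cur_x - 1]
--                             return check_queen_left(board, (cur_x - 1, cur_y + 1), drag_piece, last_piece, size, up)
--                         else:
--                             return None
--                 else:
--                     return None
--         elif drag_piece[0][0] == 'black':
--             if up:
--                 if cur_y - 1 >= 0:
--                     if board[cur_y - 1][cur_x - 1] is None:
--                         if last_piece is None:
--                             return [cur_y - 1, cur_x - 1]
--                         else:
--                             return [cur_y - 1, cur_x - 1]
--                     elif board[cur_y - 1][cur_x - 1][0] == 'black':
--                         return None
--                     elif board[cur_y - 1][cur_x - 1][0] == 'white':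
--                         if last_piece is None:
--                             last_piece = board[cur_y - 1][cur_x - 1]
--                             return check_queen_left(board, (cur_x - 1, cur_y - 1), drag_piece, last_piece, size, up)
--                         else:
--                             return None
--                 else:
--                     return None
--             else:
--                 if cur_y + 1 < size:
--                     if board[cur_y + 1][cur_x - 1] is None:
--                         if last_piece is None:
--                             return [cur_y + 1, cur_x - 1]
--                         else:
--                             return [cur_y + 1, cur_x - 1]
--                     elif board[cur_y + 1][cur_x - 1][0] == 'black':
--                         return None
--                     elif board[cur_y + 1][cur_x - 1][0] == 'white':
--                         if last_piece is None:
--                             last_piece = board[cur_y + 1][cur_x - 1]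
--                             return check_queen_left(board, (cur_x - 1, cur_y + 1), drag_piece, last_piece, size, up)
--                         else:
--                             return None
--                 else:
--                     return None
--         return valid_moves
--     else:
--         return None
-- ===== SOURCE B (Python) =====
-- def check_queen_left(board, pos, drag_piece, last_piece, size, up):
--     x, y = pos
--     if x - 1 < 0:
--         return None
--     color = drag_piece[0][0]
--     if color != 'white' and color != 'black':
--         return []
--     enemy = 'black' if color == 'white' else 'white'
--     dy = -1 if up else 1
--     while x - 1 >= 0:
--         ny = y + dy
--         if (ny < 0) if up else (ny >= size):
--             return None
--         cell = board[ny][x - 1]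
--         if cell is None:
--             return [ny, x - 1]
--         c = cell[0]
--         if c == color:
--             return None
--         if c == enemy:
--             if last_piece is not None:
--                 return None
--             last_piece = cell
--             x, y = x - 1, ny
--             continue
--         return []
--     return None
-- ===== Notes on version B (the rewrite author's own statement) =====
-- stated objective: simpler
-- what changed: A's four near-identical recursive branches (white/black x up/down) are replaced by a single iterative while-loop that computes the own/enemy colours and the row step once and then walks the diagonal.
-- outside the precondition, e.g. on check_queen_left([[None, None], [None]], (1, 1), [['white']], None, 2, True): A returns [0, 0], B returns [0, 0]; on check_queen_left([[None]], (1, 0), [['white']], None, 5, False): A raises IndexError, B raises IndexError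
import Mathlib
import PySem

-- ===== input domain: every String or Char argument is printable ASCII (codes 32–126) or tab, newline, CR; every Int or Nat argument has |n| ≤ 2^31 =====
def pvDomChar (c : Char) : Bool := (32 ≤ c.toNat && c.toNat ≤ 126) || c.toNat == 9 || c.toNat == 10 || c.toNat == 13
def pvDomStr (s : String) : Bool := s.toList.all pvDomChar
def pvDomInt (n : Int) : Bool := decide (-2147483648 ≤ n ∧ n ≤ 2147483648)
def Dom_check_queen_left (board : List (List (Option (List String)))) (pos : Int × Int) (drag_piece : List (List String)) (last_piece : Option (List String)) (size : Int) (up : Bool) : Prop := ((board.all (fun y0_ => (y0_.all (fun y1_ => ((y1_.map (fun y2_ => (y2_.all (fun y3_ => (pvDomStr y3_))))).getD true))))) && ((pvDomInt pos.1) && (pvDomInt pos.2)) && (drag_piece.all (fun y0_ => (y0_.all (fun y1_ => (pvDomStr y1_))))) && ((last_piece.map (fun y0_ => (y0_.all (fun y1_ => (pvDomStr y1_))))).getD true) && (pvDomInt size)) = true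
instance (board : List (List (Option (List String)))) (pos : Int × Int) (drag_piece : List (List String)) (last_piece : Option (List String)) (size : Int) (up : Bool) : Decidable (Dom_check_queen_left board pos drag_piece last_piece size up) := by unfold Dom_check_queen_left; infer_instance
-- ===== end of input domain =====

-- B replaces A's four near-identical white/black × up/down recursive branches by one
-- iterative walk with the own/enemy colours and the row step computed once (objective: simpler).

-- board[i][j] (none = IndexError), shared indexing helper
def pvCell (board : List (List (Option (List String)))) (i j : Int) : Option (Option (List String)) :=
  (PySem.List.pyGet? board i).bind (fun r => PySem.List.pyGet? r j)

-- drag_piece[0][0] (none = IndexError)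
def pvDragColor (drag_piece : List (List String)) : Option String :=
  (PySem.List.pyGet? drag_piece 0).bind (fun r => PySem.List.pyGet? r 0)

-- ===== PORT A =====
def check_queen_left (board : List (List (Option (List String)))) (pos : Int × Int) (drag_piece : List (List String)) (last_piece : Option (List String)) (size : Int) (up : Bool) : Option (List Int) :=
  if _hx : pos.1 - 1 ≥ 0 then
    match pvDragColor drag_piece with
    | none => none  -- Python raises IndexError here; outside Pre_
    | some dc =>
      if dc = "white" then
        (if up then
          (if pos.2 - 1 ≥ 0 then
            match pvCell board (pos.2 - 1) (pos.1 - 1) with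
            | none => none  -- IndexError; outside Pre_
            | some none => some [pos.2 - 1, pos.1 - 1]
            | some (some cell) =>
              match PySem.List.pyGet? cell 0 with
              | none => none  -- IndexError on cell[0]; outside Pre_
              | some c0 =>
                if c0 = "white" then none
                else if c0 = "black" then
                  (match last_piece with
                   | none => check_queen_left board (pos.1 - 1, pos.2 - 1) drag_piece (some cell) size up
                   | some _ => none)
                else some []  -- falls through to `return valid_moves`
          else none)
        else
          (if pos.2 + 1 < size then
            match pvCell board (pos.2 + 1) (pos.1 - 1) with
            | none => none
            | some none => some [pos.2 + 1, pos.1 - 1]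
            | some (some cell) =>
              match PySem.List.pyGet? cell 0 with
              | none => none
              | some c0 =>
                if c0 = "white" then none
                else if c0 = "black" then
                  (match last_piece with
                   | none => check_queen_left board (pos.1 - 1, pos.2 + 1) drag_piece (some cell) size up
                   | some _ => none)
                else some []
          else none))
      else if dc = "black" then
        (if up then
          (if pos.2 - 1 ≥ 0 then
            match pvCell board (pos.2 - 1) (pos.1 - 1) with
            | none => none
            | some none => some [pos.2 - 1, pos.1 - 1]
            | some (some cell) =>
              match PySem.List.pyGet? cell 0 with
              | none => none
              | some c0 =>
                if c0 = "black" then none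
                else if c0 = "white" then
                  (match last_piece with
                   | none => check_queen_left board (pos.1 - 1, pos.2 - 1) drag_piece (some cell) size up
                   | some _ => none)
                else some []
          else none)
        else
          (if pos.2 + 1 < size then
            match pvCell board (pos.2 + 1) (pos.1 - 1) with
            | none => none
            | some none => some [pos.2 + 1, pos.1 - 1]
            | some (some cell) =>
              match PySem.List.pyGet? cell 0 with
              | none => none
              | some c0 =>
                if c0 = "black" then none
                else if c0 = "white" then
                  (match last_piece with
                   | none => check_queen_left board (pos.1 - 1, pos.2 + 1) drag_piece (some cell) size up
                   | some _ => none)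
                else some []
          else none))
      else some []  -- `return valid_moves`
  else none
termination_by pos.1.toNat
decreasing_by all_goals simp_all; omega

-- ===== PORT B =====
-- the while-loop of Source B
def cql_walk (board : List (List (Option (List String)))) (color enemy : String) (size : Int) (up : Bool) (x y : Int) (last_piece : Option (List String)) : Option (List Int) :=
  if _hx : x - 1 ≥ 0 then
    let ny := y + (if up then -1 else 1)
    if (if up then ny < 0 else ny ≥ size) then none
    else
      match pvCell board ny (x - 1) with
      | none => none  -- IndexError; outside Pre_
      | some none => some [ny, x - 1]
      | some (some cell) =>
        match PySem.List.pyGet? cell 0 with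
        | none => none  -- IndexError; outside Pre_
        | some c =>
          if c = color then none
          else if c = enemy then
            (match last_piece with
             | some _ => none
             | none => cql_walk board color enemy size up (x - 1) ny (some cell))
          else some []
  else none
termination_by x.toNat
decreasing_by simp_all; omega

def check_queen_left_alt (board : List (List (Option (List String)))) (pos : Int × Int) (drag_piece : List (List String)) (last_piece : Option (List String)) (size : Int) (up : Bool) : Option (List Int) :=
  if pos.1 - 1 < 0 then none
  else
    match pvDragColor drag_piece with
    | none => none  -- IndexError; outside Pre_
    | some color =>
      if color ≠ "white" ∧ color ≠ "black" then some []
      else cql_walk board color (if color = "white" then "black" else "white") size up pos.1 pos.2 last_piece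

-- ===== PRECONDITION & SPEC =====
-- Pre_ excludes exactly the inputs on which A raises IndexError (empty drag_piece rows, an
-- out-of-range or ragged board access, an empty-list cell along the walk); the board condition is a
-- conservative closed-form shape (square size×size board with no empty-list cells, position inside),
-- so it also excludes some ragged boards on which A's walk happens to stay in bounds and return.
def Pre_check_queen_left (board : List (List (Option (List String)))) (pos : Int × Int) (drag_piece : List (List String)) (last_piece : Option (List String)) (size : Int) (up : Bool) : Prop :=
  pos.1 - 1 < 0 ∨
  ((pvDragColor drag_piece).isSome ∧
    ((pvDragColor drag_piece ≠ some "white" ∧ pvDragColor drag_piece ≠ some "black") ∨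
     (if up then pos.2 - 1 < 0 else pos.2 + 1 ≥ size) ∨
     ((board.length : Int) = size ∧
      (∀ row ∈ board, (row.length : Int) = size ∧ ∀ cell ∈ row, cell ≠ some ([] : List String)) ∧
      0 ≤ pos.2 ∧ pos.2 ≤ size ∧ pos.1 ≤ size)))
instance (board : List (List (Option (List String)))) (pos : Int × Int) (drag_piece : List (List String)) (last_piece : Option (List String)) (size : Int) (up : Bool) : Decidable (Pre_check_queen_left board pos drag_piece last_piece size up) := by unfold Pre_check_queen_left; infer_instance

def pvWitness_check_queen_left : List (List (Option (List String))) × (Int × Int) × List (List String) × Option (List String) × Int × Bool :=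
  ([[none]], (1, 0), [["white"]], none, 1, false)

def Spec_check_queen_left (board : List (List (Option (List String)))) (pos : Int × Int) (drag_piece : List (List String)) (last_piece : Option (List String)) (size : Int) (up : Bool) (out : Option (List Int)) : Prop := out = check_queen_left_alt board pos drag_piece last_piece size up
instance (board : List (List (Option (List String)))) (pos : Int × Int) (drag_piece : List (List String)) (last_piece : Option (List String)) (size : Int) (up : Bool) (out : Option (List Int)) : Decidable (Spec_check_queen_left board pos drag_piece last_piece size up out) := by unfold Spec_check_queen_left; infer_instance

-- ===== CLAIM (what is proved, stated in full; the proofs are below) =====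
def Claim_equal_check_queen_left : Prop := ∀ (board : List (List (Option (List String)))) (pos : Int × Int) (drag_piece : List (List String)) (last_piece : Option (List String)) (size : Int) (up : Bool), Dom_check_queen_left board pos drag_piece last_piece size up → Pre_check_queen_left board pos drag_piece last_piece size up → Spec_check_queen_left board pos drag_piece last_piece size up (check_queen_left board pos drag_piece last_piece size up)

-- ===== LEMMAS AND PROOFS =====

-- The ports agree even without Pre_: the walk of B mirrors A's recursion step for step.
lemma walk_eq (board : List (List (Option (List String)))) (drag_piece : List (List String)) (size : Int) (up : Bool) (color : String)
    (hc : pvDragColor drag_piece = some color)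
    (hw : color = "white" ∨ color = "black") :
    ∀ (n : Nat) (x y : Int) (last : Option (List String)), x.toNat ≤ n →
      check_queen_left board (x, y) drag_piece last size up
        = cql_walk board color (if color = "white" then "black" else "white") size up x y last := by
  intro n
  induction n with
  | zero =>
    intro x y last hx
    rw [check_queen_left, cql_walk]
    rw [dif_neg (by simp; omega), dif_neg (by omega)]
  | succ n ih =>
    intro x y last hx
    rw [check_queen_left, cql_walk]
    by_cases hx1 : x - 1 >= 0
    case neg => rw [dif_neg (by simpa using hx1), dif_neg hx1]
    case pos =>
    rw [dif_pos (by simpa using hx1), dif_pos hx1]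
    rcases hw with hw | hw <;> subst hw <;> cases up <;> simp only [hc, reduceIte, Bool.false_eq_true, if_false, if_true]
    · -- white, down
      by_cases hy : y + 1 < size
      · simp only [if_pos hy, if_neg (show ¬ (y + 1 ≥ size) by omega)]
        cases hcell : pvCell board (y + 1) (x - 1) with
        | none => simp
        | some cell =>
          cases cell with
          | none => simp
          | some l =>
            simp only
            cases hl : PySem.List.pyGet? l 0 with
            | none => simp
            | some c0 =>
              by_cases h1 : c0 = "white"
              · simp [h1]
              · by_cases h2 : c0 = "black"
                · simp only [h1, h2, if_false, reduceIte, if_true]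
                  cases last with
                  | some _ => simp
                  | none => simpa using ih (x - 1) (y + 1) (some l) (by omega)
                · simp [h1, h2]
      · simp only [if_neg hy, if_pos (show y + 1 ≥ size by omega)] <;> simp
    · -- white, up
      by_cases hy : y - 1 >= 0
      · simp only [if_pos hy, if_neg (show ¬ (y + -1 < 0) by omega)]
        have he : y + -1 = y - 1 := by ring
        rw [he]
        cases hcell : pvCell board (y - 1) (x - 1) with
        | none => simp
        | some cell =>
          cases cell with
          | none => simp
          | some l =>
            simp only
            cases hl : PySem.List.pyGet? l 0 with
            | none => simp
            | some c0 =>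
              by_cases h1 : c0 = "white"
              · simp [h1]
              · by_cases h2 : c0 = "black"
                · simp only [h1, h2, if_false, reduceIte, if_true]
                  cases last with
                  | some _ => simp
                  | none => simpa using ih (x - 1) (y - 1) (some l) (by omega)
                · simp [h1, h2]
      · simp only [if_neg hy, if_pos (show y + -1 < 0 by omega)] <;> simp
    · -- black, down
      by_cases hy : y + 1 < size
      · simp only [if_pos hy, if_neg (show ¬ (y + 1 ≥ size) by omega)]
        cases hcell : pvCell board (y + 1) (x - 1) with
        | none => simp
        | some cell =>
          cases cell with
          | none => simp
          | some l =>
            simp only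
            cases hl : PySem.List.pyGet? l 0 with
            | none => simp
            | some c0 =>
              by_cases h1 : c0 = "black"
              · simp [h1]
              · by_cases h2 : c0 = "white"
                · simp only [h1, h2, if_false, reduceIte, if_true]
                  cases last with
                  | some _ => simp
                  | none => simpa using ih (x - 1) (y + 1) (some l) (by omega)
                · simp [h1, h2]
      · simp only [if_neg hy, if_pos (show y + 1 ≥ size by omega)] <;> simp
    · -- black, up
      by_cases hy : y - 1 >= 0
      · simp only [if_pos hy, if_neg (show ¬ (y + -1 < 0) by omega)]
        have he : y + -1 = y - 1 := by ring
        rw [he]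
        cases hcell : pvCell board (y - 1) (x - 1) with
        | none => simp
        | some cell =>
          cases cell with
          | none => simp
          | some l =>
            simp only
            cases hl : PySem.List.pyGet? l 0 with
            | none => simp
            | some c0 =>
              by_cases h1 : c0 = "black"
              · simp [h1]
              · by_cases h2 : c0 = "white"
                · simp only [h1, h2, if_false, reduceIte, if_true]
                  cases last with
                  | some _ => simp
                  | none => simpa using ih (x - 1) (y - 1) (some l) (by omega)
                · simp [h1, h2]
      · simp only [if_neg hy, if_pos (show y + -1 < 0 by omega)] <;> simp

-- ===== VERDICT (by name: the statement is the Claim_ definition above) =====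
theorem check_queen_left_spec : Claim_equal_check_queen_left := by
  intro board pos drag_piece last_piece size up _ _
  unfold Spec_check_queen_left
  obtain ⟨px, py⟩ := pos
  rw [check_queen_left_alt]
  dsimp only
  by_cases hx : px - 1 < 0
  · rw [if_pos hx, check_queen_left]
    rw [dif_neg (show ¬ ((px, py).1 - 1 ≥ 0) by dsimp only; omega)]
  · rw [if_neg hx]
    cases hc : pvDragColor drag_piece with
    | none =>
      rw [check_queen_left, dif_pos (show (px, py).1 - 1 ≥ 0 by dsimp only; omega)]
      simp [hc]
    | some color =>
      show check_queen_left board (px, py) drag_piece last_piece size up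
        = if color ≠ "white" ∧ color ≠ "black" then some []
          else cql_walk board color (if color = "white" then "black" else "white") size up px py last_piece
      by_cases hw : color = "white" ∨ color = "black"
      · have hne : ¬ (color ≠ "white" ∧ color ≠ "black") := by tauto
        rw [if_neg hne]
        exact walk_eq board drag_piece size up color hc hw px.toNat px py last_piece (le_refl _)
      · push_neg at hw
        rw [if_pos hw, check_queen_left, dif_pos (show (px, py).1 - 1 ≥ 0 by dsimp only; omega)]
        simp [hc, hw.1, hw.2]
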